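-- pv_equiv track=rewrite | github.com/mrklyndndcst/Python-Programming-for-Beginners-in-Data-Science | exercise_14.py | alternate_odd
-- ===== SOURCE A (Python) =====
-- def alternate_odd(n):
--   total = 0
--   add = True
--   for i in range(n + 1):
--     if i % 2 != 0:
--       if add:
--         total += i
--         add = False
--       else:
--         add = True
--   return total
-- ===== SOURCE B (Python) =====
-- def alternate_odd(n):
--   # closed form: the summed numbers are those with remainder one modulo four
--   # (every other odd number); with k such terms the sum is k*(2k-1)
--   k = (n + 3) // 4
--   if k < 0:
--     k = 0
--   return k * (2 * k - 1)
-- ===== Notes on version B (the rewrite author's own statement) =====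
-- stated objective: faster
-- what changed: Replaces the linear toggle-flag loop with a constant-time closed-form arithmetic-series sum k*(2k-1) over the k summed terms.
import Mathlib
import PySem

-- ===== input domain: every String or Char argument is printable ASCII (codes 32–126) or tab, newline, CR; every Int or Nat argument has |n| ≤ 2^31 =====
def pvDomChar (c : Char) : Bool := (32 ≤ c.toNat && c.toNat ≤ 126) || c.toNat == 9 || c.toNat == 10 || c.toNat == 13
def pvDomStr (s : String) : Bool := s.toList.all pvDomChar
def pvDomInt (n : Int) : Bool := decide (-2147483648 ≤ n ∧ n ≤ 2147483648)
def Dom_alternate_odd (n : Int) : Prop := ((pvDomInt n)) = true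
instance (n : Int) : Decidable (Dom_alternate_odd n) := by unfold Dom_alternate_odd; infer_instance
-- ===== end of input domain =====

-- ===== PORT A =====
-- B replaces the O(n) toggle-flag loop with the closed-form sum k*(2k-1); objective: faster.
def alternate_odd (n : Int) : Int :=
  (PySem.List.pyRange 0 (n + 1) 1).foldl
    (fun (st : Int × Bool) i =>
      if PySem.Int.mod i 2 != 0 then
        if st.2 then (st.1 + i, false) else (st.1, true)
      else st)
    (0, true) |>.1

-- ===== PORT B =====
def alternate_odd_alt (n : Int) : Int :=
  let k0 := PySem.Int.floordiv (n + 3) 4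
  let k := if k0 < 0 then 0 else k0
  k * (2 * k - 1)

-- ===== PRECONDITION & SPEC =====
def Spec_alternate_odd (n : Int) (out : Int) : Prop := out = alternate_odd_alt n
instance (n : Int) (out : Int) : Decidable (Spec_alternate_odd n out) := by unfold Spec_alternate_odd; infer_instance

-- ===== CLAIM (what is proved, stated in full; the proofs are below) =====
def Claim_equal_alternate_odd : Prop := ∀ (n : Int), Dom_alternate_odd n → Spec_alternate_odd n (alternate_odd n)

-- ===== LEMMAS AND PROOFS =====

-- the loop state after processing range(0, m)
def pvStep (st : Int × Bool) (i : Int) : Int × Bool :=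
  if PySem.Int.mod i 2 != 0 then
    if st.2 then (st.1 + i, false) else (st.1, true)
  else st

def pvSt (m : Nat) : Int × Bool :=
  (PySem.List.pyRange 0 (m : Int) 1).foldl pvStep (0, true)

lemma pvSt_zero : pvSt 0 = (0, true) := by
  simp [pvSt, PySem.List.pyRange_one_eq_nil (by omega : (0:Int) ≤ 0)]

lemma pvSt_succ (m : Nat) : pvSt (m + 1) = pvStep (pvSt m) (m : Int) := by
  unfold pvSt
  rw [show ((m + 1 : Nat) : Int) = (m : Int) + 1 by push_cast; ring,
      PySem.List.pyRange_one_succ_right (by exact_mod_cast Nat.zero_le m)]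
  simp [List.foldl_append]

-- closed form of the loop state
lemma pvSt_closed (m : Nat) :
    pvSt m = ((((m + 2) / 4 : Nat) : Int) * (2 * (((m + 2) / 4 : Nat) : Int) - 1),
              decide (m / 2 % 2 = 0)) := by
  induction m with
  | zero => simpa using pvSt_zero
  | succ m ih =>
    rw [pvSt_succ, ih]
    have h4 : m % 4 = 0 ∨ m % 4 = 1 ∨ m % 4 = 2 ∨ m % 4 = 3 := by omega
    rcases h4 with h | h | h | h
    · obtain ⟨q, hq⟩ : ∃ q, m = 4 * q := ⟨m / 4, by omega⟩
      subst hq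
      have e5 : PySem.Int.mod ((4*q : Nat) : Int) 2 = (((4*q) % 2 : Nat) : Int) := by
        exact_mod_cast PySem.Int.mod_natCast (4*q) 2
      rw [(by omega : (4*q) % 2 = 0)] at e5
      simp only [pvStep, e5,
        (by omega : (4*q + 1 + 2) / 4 = (4*q + 2) / 4),
        (by omega : (4*q + 1) / 2 % 2 = (4*q) / 2 % 2)]
      norm_num
    · obtain ⟨q, hq⟩ : ∃ q, m = 4 * q + 1 := ⟨m / 4, by omega⟩
      subst hq
      have e1 : (4*q+1 + 2) / 4 = q := by omega
      have e2 : (4*q+1+1 + 2) / 4 = q + 1 := by omega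
      have e3 : (4*q+1) / 2 % 2 = 0 := by omega
      have e4 : (4*q+1+1) / 2 % 2 = 1 := by omega
      have e5 : PySem.Int.mod ((4*q+1 : Nat) : Int) 2 = (((4*q+1) % 2 : Nat) : Int) := by
        exact_mod_cast PySem.Int.mod_natCast (4*q+1) 2
      rw [(by omega : (4*q+1) % 2 = 1)] at e5
      simp only [pvStep, e1, e2, e3, e4, e5]
      norm_num
      ring
    · obtain ⟨q, hq⟩ : ∃ q, m = 4 * q + 2 := ⟨m / 4, by omega⟩
      subst hq
      have e5 : PySem.Int.mod ((4*q+2 : Nat) : Int) 2 = (((4*q+2) % 2 : Nat) : Int) := by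
        exact_mod_cast PySem.Int.mod_natCast (4*q+2) 2
      rw [(by omega : (4*q+2) % 2 = 0)] at e5
      simp only [pvStep, e5,
        (by omega : (4*q+2 + 1 + 2) / 4 = (4*q+2 + 2) / 4),
        (by omega : (4*q+2 + 1) / 2 % 2 = (4*q+2) / 2 % 2)]
      norm_num
    · obtain ⟨q, hq⟩ : ∃ q, m = 4 * q + 3 := ⟨m / 4, by omega⟩
      subst hq
      have e1 : (4*q+3 + 1 + 2) / 4 = (4*q+3 + 2) / 4 := by omega
      have e3 : (4*q+3) / 2 % 2 = 1 := by omega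
      have e4 : (4*q+3+1) / 2 % 2 = 0 := by omega
      have e5 : PySem.Int.mod ((4*q+3 : Nat) : Int) 2 = (((4*q+3) % 2 : Nat) : Int) := by
        exact_mod_cast PySem.Int.mod_natCast (4*q+3) 2
      rw [(by omega : (4*q+3) % 2 = 1)] at e5
      simp only [pvStep, e1, e3, e4, e5]
      norm_num

theorem alternate_odd_spec : Claim_equal_alternate_odd := by
  unfold Claim_equal_alternate_odd Spec_alternate_odd
  intro n _
  show ((PySem.List.pyRange 0 (n + 1) 1).foldl pvStep (0, true)).1 = alternate_odd_alt n
  by_cases hn : 0 ≤ n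
  · have hm : n + 1 = ((n.toNat + 1 : Nat) : Int) := by omega
    rw [hm]
    have hcl := pvSt_closed (n.toNat + 1)
    unfold pvSt at hcl
    rw [hcl]
    have hk : PySem.Int.floordiv (n + 3) 4 = (((n.toNat + 1 + 2) / 4 : Nat) : Int) := by
      rw [(by omega : n + 3 = ((n.toNat + 1 + 2 : Nat) : Int))]
      exact_mod_cast PySem.Int.floordiv_natCast (n.toNat + 1 + 2) 4
    have hK : ¬ ((((n.toNat + 1 + 2) / 4 : Nat) : Int) < 0) := by
      exact not_lt.mpr (Int.natCast_nonneg _)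
    simp only [alternate_odd_alt, hk, if_neg hK]
  · rw [PySem.List.pyRange_one_eq_nil (by omega : n + 1 ≤ 0)]
    have hk : PySem.Int.floordiv (n + 3) 4 < 1 :=
      (PySem.Int.floordiv_lt_iff_lt_mul (by omega : (0:Int) < 4)).mpr (by omega)
    by_cases hneg : PySem.Int.floordiv (n + 3) 4 < 0
    · simp only [alternate_odd_alt, if_pos hneg]
      norm_num
    · have h0 : PySem.Int.floordiv (n + 3) 4 = 0 := by omega
      simp only [alternate_odd_alt, h0]
      norm_num
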